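-- pv_equiv track=rewrite | github.com/lucas-tsunaki/superq2026-qdot | solutions/Problem11/problem11.py | greedy_order_by_symdiff
-- ===== SOURCE A (Python) =====
-- def greedy_order_by_symdiff(control_sets):
--     remaining = list(control_sets)
--     cur = frozenset()
--     out = []
--     while remaining:
--         best_i = None
--         best_cost = 10**9
--         for i, s in enumerate(remaining):
--             cost = len(cur.symmetric_difference(s))
--             if cost < best_cost:
--                 best_cost = cost
--                 best_i = i
--         nxt = remaining.pop(best_i)
--         out.append(nxt)
--         cur = nxt
--     return out
-- ===== SOURCE B (Python) =====
-- def greedy_order_by_symdiff(control_sets):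
--     # cost(cur, s) = len(cur) + len(s) - 2*|cur & s|; |cur & s| for all s at once
--     # via an inverted index element -> list of set ids, instead of computing
--     # symmetric differences pairwise.
--     n = len(control_sets)
--     sets = [frozenset(s) for s in control_sets]
--     inv = {}
--     for i in range(n):
--         for x in sets[i]:
--             inv.setdefault(x, []).append(i)
--     used = [False] * n
--     out = []
--     cur = frozenset()
--     for _ in range(n):
--         inter = [0] * n
--         for x in cur:
--             for j in inv.get(x, []):
--                 inter[j] += 1
--         best_i = None
--         best_cost = 10**9
--         for i in range(n):
--             if used[i]:
--                 continue
--             cost = len(cur) + len(sets[i]) - 2 * inter[i]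
--             if cost < best_cost:
--                 best_cost = cost
--                 best_i = i
--         used[best_i] = True
--         out.append(control_sets[best_i])
--         cur = sets[best_i]
--     return out
-- ===== Notes on version B (the rewrite author's own statement) =====
-- stated objective: faster
-- what changed: Instead of recomputing len(cur ^ s) for every remaining set in every round, B builds an inverted index element->set ids once and each round obtains all intersection sizes |cur & s_i| by walking only the postings of cur's elements, turning each candidate's cost into the O(1) formula len(cur)+len(s_i)-2*inter[i]; selection uses used-flags instead of list.pop.
import Mathlib
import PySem

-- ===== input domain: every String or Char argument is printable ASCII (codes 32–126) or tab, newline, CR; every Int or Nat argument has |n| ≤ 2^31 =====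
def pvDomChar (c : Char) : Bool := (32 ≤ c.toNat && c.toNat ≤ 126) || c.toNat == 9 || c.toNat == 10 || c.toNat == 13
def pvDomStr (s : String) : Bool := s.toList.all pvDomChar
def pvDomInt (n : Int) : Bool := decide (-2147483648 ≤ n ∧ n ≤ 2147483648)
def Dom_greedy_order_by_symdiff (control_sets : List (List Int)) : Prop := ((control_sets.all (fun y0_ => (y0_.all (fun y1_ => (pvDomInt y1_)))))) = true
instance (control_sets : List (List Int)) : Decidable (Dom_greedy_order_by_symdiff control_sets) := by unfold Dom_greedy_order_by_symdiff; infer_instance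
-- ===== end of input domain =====

-- B replaces A's per-round pairwise symmetric differences by an inverted index
-- (element -> ids of sets containing it) and the cost formula |cur|+|s|-2*|cur∩s|;
-- objective: faster (measurably so on the timing inputs).
-- The input elements are Python sets (list[set[int]]), modelled as duplicate-free lists.

-- ===== PORT A =====
-- `for i, s in enumerate(remaining): cost = len(cur.symmetric_difference(s)); if cost < best_cost: ...`
-- (s is a Python set; PySem.Set.ofList is the identity on its duplicate-free list model)
def pvAScan (cur : PySem.Set Int) : List (List Int) → Nat → Option Nat × Int → Option Nat × Int
  | [], _, best => best
  | s :: rest, i, (bi, bc) =>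
    let cost : Int := ((PySem.Set.symmDiff cur (PySem.Set.ofList s)).length : Int)
    if cost < bc then pvAScan cur rest (i + 1) (some i, cost)
    else pvAScan cur rest (i + 1) (bi, bc)

-- `while remaining:` — each pass pops one element, so the initial length is enough fuel.
def pvALoop : Nat → List (List Int) → PySem.Set Int → List (List Int) → List (List Int)
  | 0, _, _, out => out
  | fuel + 1, remaining, cur, out =>
    if remaining.isEmpty then out
    else
      match (pvAScan cur remaining 0 (none, 1000000000)).1 with
      | none => out -- Python: `remaining.pop(None)` raises TypeError; reachable only when every cost ≥ 10^9
      | some bi =>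
        -- nxt = remaining.pop(best_i); bi < remaining.length whenever the scan returns some
        let nxt := remaining.getD bi []
        pvALoop fuel (remaining.eraseIdx bi) (PySem.Set.ofList nxt) (out ++ [nxt])

def greedy_order_by_symdiff (control_sets : List (List Int)) : List (List Int) :=
  pvALoop control_sets.length control_sets PySem.Set.empty []

-- ===== PORT B =====
-- `for i in range(n): for x in sets[i]: inv.setdefault(x, []).append(i)`
-- (iterating the set sets[i] in any order yields the same dict-as-lookup-table)
def pvBInv (sets : List (List Int)) : PySem.Dict Int (List Nat) :=
  (List.range sets.length).foldl
    (fun d i => (sets.getD i []).foldl (fun d x => d.modify x [] (· ++ [i])) d)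
    PySem.Dict.empty

-- `inter = [0]*n; for x in cur: for j in inv.get(x, []): inter[j] += 1`
-- (all j are in range; the bump total does not depend on the set-iteration order)
def pvBInter (n : Nat) (inv : PySem.Dict Int (List Nat)) (cur : PySem.Set Int) : List Int :=
  cur.foldl
    (fun a x => (inv.getD x []).foldl (fun a j => a.set j (a.getD j 0 + 1)) a)
    (List.replicate n (0 : Int))

-- `for i in range(n): if used[i]: continue; cost = len(cur)+len(sets[i])-2*inter[i]; ...`
def pvBScan (n : Nat) (used : List Bool) (sets : List (List Int)) (cur : PySem.Set Int)
    (inter : List Int) : Option Nat × Int :=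
  (List.range n).foldl
    (fun b i =>
      if used.getD i false then b
      else
        let cost : Int := (cur.length : Int) + ((sets.getD i []).length : Int) - 2 * inter.getD i 0
        if cost < b.2 then (some i, cost) else b)
    (none, 1000000000)

-- `for _ in range(n): ...` with the per-round rebuild of inter
def pvBLoop (control_sets sets : List (List Int)) (inv : PySem.Dict Int (List Nat)) :
    Nat → List Bool → List (List Int) → PySem.Set Int → List (List Int)
  | 0, _, out, _ => out
  | k + 1, used, out, cur =>
    let inter := pvBInter sets.length inv cur
    match (pvBScan sets.length used sets cur inter).1 with
    | none => out -- Python: `used[None]` raises TypeError; reachable only when every candidate cost ≥ 10^9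
    | some i =>
      pvBLoop control_sets sets inv k (used.set i true)
        (out ++ [control_sets.getD i []]) (sets.getD i [])

def greedy_order_by_symdiff_alt (control_sets : List (List Int)) : List (List Int) :=
  let sets := control_sets.map PySem.Set.ofList
  pvBLoop control_sets sets (pvBInv sets) control_sets.length
    (List.replicate control_sets.length false) [] PySem.Set.empty

-- ===== PRECONDITION & SPEC =====
def Spec_greedy_order_by_symdiff (control_sets : List (List Int)) (out : List (List Int)) : Prop := out = greedy_order_by_symdiff_alt control_sets
instance (control_sets : List (List Int)) (out : List (List Int)) : Decidable (Spec_greedy_order_by_symdiff control_sets out) := by unfold Spec_greedy_order_by_symdiff; infer_instance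

-- ===== CLAIM (what is proved, stated in full; the proofs are below) =====
def Claim_equal_greedy_order_by_symdiff : Prop := ∀ (control_sets : List (List Int)), Dom_greedy_order_by_symdiff control_sets → Spec_greedy_order_by_symdiff control_sets (greedy_order_by_symdiff control_sets)

-- ===== LEMMAS AND PROOFS =====

-- A common reference for both selection scans: fold `if cost < best: take it` over (index, cost) pairs.
def pvPick : List (Nat × Int) → Option Nat × Int → Option Nat × Int
  | [], b => b
  | (i, c) :: r, (bi, bc) => pvPick r (if c < bc then (some i, c) else (bi, bc))

def pvEnum : Nat → List Int → List (Nat × Int)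
  | _, [] => []
  | i, c :: r => (i, c) :: pvEnum (i + 1) r

lemma pvAScan_eq_pick (cur : PySem.Set Int) :
    ∀ (l : List (List Int)) (i : Nat) (b : Option Nat × Int),
      pvAScan cur l i b =
        pvPick (pvEnum i (l.map (fun s => ((PySem.Set.symmDiff cur (PySem.Set.ofList s)).length : Int)))) b := by
  intro l
  induction l with
  | nil => intro i b; rfl
  | cons s rest ih =>
    intro i b
    obtain ⟨bi, bc⟩ := b
    simp only [pvAScan, List.map, pvEnum, pvPick]
    split_ifs with h
    · rw [ih]
    · rw [ih]

lemma pvFoldl_scan_eq_pick (p : Nat → Bool) (c : Nat → Int) :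
    ∀ (l : List Nat) (b : Option Nat × Int),
      l.foldl (fun b i => if p i then b else if c i < b.2 then (some i, c i) else b) b =
        pvPick ((l.filter (fun i => !p i)).map (fun i => (i, c i))) b := by
  intro l
  induction l with
  | nil => intro b; rfl
  | cons j rest ih =>
    intro b
    obtain ⟨bi, bc⟩ := b
    simp only [List.foldl, List.filter]
    by_cases hp : p j
    · simp [hp, ih]
    · simp only [hp, Bool.not_false, List.map, pvPick, if_neg (Bool.false_ne_true)]
      rw [ih]

lemma pvPick_map (f : Nat → Nat) :
    ∀ (l : List (Nat × Int)) (bi : Option Nat) (bc : Int),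
      pvPick (l.map (fun q => (f q.1, q.2))) (bi.map f, bc) =
        ((pvPick l (bi, bc)).1.map f, (pvPick l (bi, bc)).2) := by
  intro l
  induction l with
  | nil => intro bi bc; rfl
  | cons q rest ih =>
    intro bi bc
    obtain ⟨i, c⟩ := q
    simp only [List.map, pvPick]
    split_ifs with h
    · exact ih (some i) c
    · exact ih bi bc

lemma pvEnum_relabel (g : Nat → Nat) (c : Nat → Int) :
    ∀ (us : List Nat) (k : Nat), (∀ j, j < us.length → g (k + j) = us.getD j 0) →
      (pvEnum k (us.map c)).map (fun q => (g q.1, q.2)) = us.map (fun i => (i, c i)) := by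
  intro us
  induction us with
  | nil => intro k _; rfl
  | cons u rest ih =>
    intro k h
    have h0 : g k = u := by
      have := h 0 (by simp)
      simpa using this
    have hrec : ∀ j, j < rest.length → g (k + 1 + j) = rest.getD j 0 := by
      intro j hj
      have := h (j + 1) (by simpa using Nat.succ_lt_succ hj)
      rw [show k + 1 + j = k + (j + 1) by omega]
      simpa using this
    simp only [List.map, pvEnum]
    rw [h0, ih (k + 1) hrec]

lemma pvPick_fst_some :
    ∀ (l : List (Nat × Int)) (b : Option Nat × Int) (i : Nat),
      (pvPick l b).1 = some i → b.1 = some i ∨ i ∈ l.map (·.1) := by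
  intro l
  induction l with
  | nil => intro b i h; exact Or.inl h
  | cons q rest ih =>
    intro b i h
    obtain ⟨j, c⟩ := q
    obtain ⟨bi, bc⟩ := b
    simp only [pvPick] at h
    rcases ih _ _ h with h' | h'
    · by_cases hc : c < bc
      · simp [hc] at h'
        right; simp [h'.symm]
      · simp [hc] at h'
        left; exact h'
    · right; simp [h']

lemma pvEnum_fst_lt :
    ∀ (cs : List Int) (k i : Nat), i ∈ (pvEnum k cs).map (·.1) → i < k + cs.length := by
  intro cs
  induction cs with
  | nil => intro k i h; simp [pvEnum] at h
  | cons c rest ih =>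
    intro k i h
    simp only [pvEnum, List.map, List.mem_cons] at h
    rcases h with h | h
    · simp only [List.length_cons]
      omega

    · have := ih (k + 1) i h
      simp only [List.length_cons]
      omega

lemma pvGetD_map_lt {α β : Type} (f : α → β) (l : List α) (k : Nat) (d : α) (e : β)
    (h : k < l.length) : (l.map f).getD k e = f (l.getD k d) := by
  simp only [List.getD_eq_getElem?_getD, List.getElem?_map]
  rw [List.getElem?_eq_getElem h]
  simp

lemma pvCountP_inter_comm (a b : List Int) (ha : a.Nodup) (hb : b.Nodup) :
    a.countP (fun x => decide (x ∈ b)) = b.countP (fun x => decide (x ∈ a)) := by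
  rw [List.countP_eq_length_filter, List.countP_eq_length_filter]
  have hfa : (a.filter (fun x => decide (x ∈ b))).Nodup := ha.filter _
  have hfb : (b.filter (fun x => decide (x ∈ a))).Nodup := hb.filter _
  rw [← List.toFinset_card_of_nodup hfa, ← List.toFinset_card_of_nodup hfb]
  congr 1
  apply Finset.ext
  intro x
  simp [List.mem_filter, and_comm]

lemma pvCost_eq (cur s : List Int) (hc : cur.Nodup) :
    ((PySem.Set.symmDiff cur (PySem.Set.ofList s)).length : Int) =
      (cur.length : Int) + ((PySem.Set.ofList s).length : Int) -
        2 * (cur.countP (fun x => decide (x ∈ PySem.Set.ofList s)) : Int) := by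
  set t := PySem.Set.ofList s with ht
  have htn : t.Nodup := PySem.Set.nodup_ofList s
  have h1 : (PySem.Set.symmDiff cur t).length =
      cur.countP (fun x => !t.contains x) + t.countP (fun x => !cur.contains x) := by
    show (List.filter _ cur ++ List.filter _ t).length = _
    simp [List.countP_eq_length_filter]
  have hcontains : ∀ (l : List Int) (x : Int), l.contains x = decide (x ∈ l) := by
    intro l x
    simp [List.contains_iff_mem]
  have h2 : cur.length = cur.countP (fun x => decide (x ∈ t)) + cur.countP (fun x => !t.contains x) := by
    rw [List.length_eq_countP_add_countP (fun x => decide (x ∈ t))]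
    congr 1
    apply List.countP_congr
    intro x _
    simp [hcontains]
  have h3 : t.length = t.countP (fun x => decide (x ∈ cur)) + t.countP (fun x => !cur.contains x) := by
    rw [List.length_eq_countP_add_countP (fun x => decide (x ∈ cur))]
    congr 1
    apply List.countP_congr
    intro x _
    simp [hcontains]
  have h4 := pvCountP_inter_comm cur t hc htn
  rw [h1]
  push_cast
  omega

lemma pvRange_map_getD (cs : List (List Int)) :
    (List.range cs.length).map (fun i => cs.getD i []) = cs := by
  apply List.ext_getElem
  · simp
  · intro i h1 h2
    simp [List.getD_eq_getElem?_getD, List.getElem?_eq_getElem h2]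

lemma pvBump_length :
    ∀ (js : List Nat) (a : List Int),
      (js.foldl (fun a j => a.set j (a.getD j 0 + 1)) a).length = a.length := by
  intro js
  induction js with
  | nil => intro a; rfl
  | cons j rest ih =>
    intro a
    simp only [List.foldl]
    rw [ih]
    simp

lemma pvBump_getD (i : Nat) :
    ∀ (js : List Nat) (a : List Int), (∀ j ∈ js, j < a.length) →
      (js.foldl (fun a j => a.set j (a.getD j 0 + 1)) a).getD i 0 =
        a.getD i 0 + (js.count i : Int) := by
  intro js
  induction js with
  | nil => intro a _; simp
  | cons j rest ih =>
    intro a hb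
    have hj : j < a.length := hb j (by simp)
    simp only [List.foldl, List.count_cons]
    rw [ih _ (by intro x hx; simpa using hb x (by simp [hx]))]
    have hset : (a.set j ((a.getD j 0) + 1)).getD i 0 =
        a.getD i 0 + (if j == i then 1 else 0 : Int) := by
      by_cases hij : j = i
      · subst hij
        simp [List.getD_eq_getElem?_getD, List.getElem?_set, hj]
      · simp [List.getD_eq_getElem?_getD, List.getElem?_set, hij]
    rw [hset]
    by_cases hij : j = i <;> simp [hij] <;> ring

-- nested index-building loop = flat loop over (element, id) pairs

lemma pvFoldl_flatMap {α β δ : Type} (f : δ → β → δ) :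
    ∀ (l : List α) (g : α → List β) (d : δ),
      l.foldl (fun d i => (g i).foldl f d) d = (l.flatMap g).foldl f d := by
  intro l
  induction l with
  | nil => intro g d; rfl
  | cons i rest ih => intro g d; simp [List.flatMap_cons, List.foldl_append, ih]

lemma pvFilter_beq_of_nodup (x : Int) :
    ∀ (l : List Int), l.Nodup → l.filter (fun y => y == x) = if x ∈ l then [x] else [] := by
  intro l
  induction l with
  | nil => intro _; simp
  | cons y rest ih =>
    intro hnd
    rcases List.nodup_cons.mp hnd with ⟨hy, hrest⟩
    by_cases hxy : y = x
    · subst hxy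
      have : rest.filter (fun z => z == y) = [] := by
        apply List.filter_eq_nil_iff.mpr
        intro z hz
        simp only [beq_iff_eq]
        intro hzy
        exact hy (hzy ▸ hz)
      simp [List.filter_cons, this]
    · simp only [List.filter_cons, beq_iff_eq, hxy, if_false, ih hrest]
      by_cases hm : x ∈ rest
      · simp [hm, List.mem_cons, Ne.symm hxy, hxy]
      · simp [hm, List.mem_cons, hxy, Ne.symm hxy]

lemma pvFlatMap_if_eq_filter {α : Type} (p : α → Bool) :
    ∀ (l : List α), l.flatMap (fun i => if p i then [i] else []) = l.filter p := by
  intro l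
  induction l with
  | nil => rfl
  | cons i rest ih =>
    by_cases hp : p i <;> simp [List.flatMap_cons, hp, ih, List.filter_cons]

lemma pvFlatMap_congr {α β : Type} (l : List α) (f g : α → List β)
    (h : ∀ i ∈ l, f i = g i) : l.flatMap f = l.flatMap g := by
  induction l with
  | nil => rfl
  | cons i rest ih =>
    simp only [List.flatMap_cons]
    rw [h i (by simp), ih (fun j hj => h j (by simp [hj]))]

lemma pvBInv_getD (sets : List (List Int)) (hs : ∀ s ∈ sets, s.Nodup) (x : Int) :
    (pvBInv sets).getD x [] =
      (List.range sets.length).filter (fun i => decide (x ∈ sets.getD i [])) := by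
  have hrw : pvBInv sets =
      ((List.range sets.length).flatMap
        (fun i => (sets.getD i []).map (fun y => (y, i)))).foldl
        (fun d p => d.modify p.1 [] (· ++ [p.2])) PySem.Dict.empty := by
    unfold pvBInv
    have hfun : (fun (d : PySem.Dict Int (List Nat)) (i : Nat) =>
        (sets.getD i []).foldl (fun d x => d.modify x [] (· ++ [i])) d) =
        (fun d i => ((sets.getD i []).map (fun y => (y, i))).foldl
          (fun d p => d.modify p.1 [] (· ++ [p.2])) d) := by
      funext d i
      rw [List.foldl_map]
    rw [hfun, pvFoldl_flatMap]
  rw [hrw, PySem.Dict.getD_foldl_modify_append]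
  simp only [PySem.Dict.getD_empty, List.nil_append]
  rw [List.filter_flatMap]
  rw [List.map_flatMap]
  rw [← pvFlatMap_if_eq_filter]
  apply pvFlatMap_congr
  intro i hi
  have hilt : i < sets.length := List.mem_range.mp hi
  have hnd : (sets.getD i []).Nodup := by
    have : sets.getD i [] ∈ sets := by
      rw [List.getD_eq_getElem?_getD, List.getElem?_eq_getElem hilt]
      exact List.getElem_mem hilt
    exact hs _ this
  rw [List.filter_map]
  have : ((fun p : Int × Nat => p.1 == x) ∘ fun y => (y, i)) = fun y => y == x := rfl
  rw [this, pvFilter_beq_of_nodup x _ hnd]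
  by_cases hm : x ∈ sets.getD i []
  all_goals simp only [List.getD_eq_getElem?_getD] at hm
  · simp [hm]
  · simp [hm]

lemma pvBInter_getD (sets : List (List Int)) (hs : ∀ s ∈ sets, s.Nodup) (i : Nat)
    (hi : i < sets.length) (cur : List Int) :
    (pvBInter sets.length (pvBInv sets) cur).getD i 0 =
      (cur.countP (fun x => decide (x ∈ sets.getD i [])) : Int) := by
  unfold pvBInter
  suffices h : ∀ (c : List Int) (a : List Int), a.length = sets.length →
      (c.foldl (fun a x => ((pvBInv sets).getD x []).foldl
        (fun a j => a.set j (a.getD j 0 + 1)) a) a).getD i 0 =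
      a.getD i 0 + (c.countP (fun x => decide (x ∈ sets.getD i [])) : Int) by
    rw [h cur (List.replicate sets.length 0) (by simp)]
    rw [List.getD_replicate _ hi]
    ring
  intro c
  induction c with
  | nil => intro a _; simp
  | cons x crest ih =>
    intro a hlen
    simp only [List.foldl, List.countP_cons]
    have hjs : (pvBInv sets).getD x [] =
        (List.range sets.length).filter (fun j => decide (x ∈ sets.getD j [])) :=
      pvBInv_getD sets hs x
    have hbound : ∀ j ∈ (pvBInv sets).getD x [], j < a.length := by
      intro j hj
      rw [hjs] at hj
      have := List.mem_range.mp (List.mem_of_mem_filter hj)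
      omega
    have hlen' : (((pvBInv sets).getD x []).foldl
        (fun a j => a.set j (a.getD j 0 + 1)) a).length = sets.length := by
      rw [pvBump_length]; exact hlen
    rw [ih _ hlen', pvBump_getD i _ a hbound]
    have hcount : (((pvBInv sets).getD x []).count i : Int) =
        (if decide (x ∈ sets.getD i []) then 1 else 0 : Int) := by
      rw [hjs]
      have hnd : ((List.range sets.length).filter
          (fun j => decide (x ∈ sets.getD j []))).Nodup :=
        (List.nodup_range).filter _
      by_cases hm : x ∈ sets.getD i []
      · have hmem : i ∈ (List.range sets.length).filter
            (fun j => decide (x ∈ sets.getD j [])) := by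
          apply List.mem_filter.mpr
          refine ⟨List.mem_range.mpr hi, ?_⟩
          simp only [decide_eq_true_eq]
          exact hm
        rw [List.count_eq_one_of_mem hnd hmem]
        have hm' : x ∈ sets[i]?.getD [] := hm
        simp [hm']
      · have : i ∉ (List.range sets.length).filter
            (fun j => decide (x ∈ sets.getD j [])) := by
          intro hmem
          exact hm (by simpa using (List.mem_filter.mp hmem).2)
        rw [List.count_eq_zero.mpr this]
        have hm' : x ∉ sets[i]?.getD [] := hm
        simp [hm']
    rw [hcount]
    by_cases hm : x ∈ sets.getD i []
    · have hm' : x ∈ sets[i]?.getD [] := hm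
      simp [hm']; ring
    · have hm' : x ∉ sets[i]?.getD [] := hm
      simp [hm']

lemma pvErase_getD_eq_eraseIdx :
    ∀ (l : List Nat), l.Nodup → ∀ k, k < l.length → l.erase (l.getD k 0) = l.eraseIdx k := by
  intro l
  induction l with
  | nil => intro _ k hk; simp at hk
  | cons y rest ih =>
    intro hnd k hk
    rcases List.nodup_cons.mp hnd with ⟨hy, hrest⟩
    match k with
    | 0 => simp [List.erase_cons_head]
    | k + 1 =>
      have hk' : k < rest.length := by simpa using hk
      have hg : (y :: rest).getD (k + 1) 0 = rest.getD k 0 := by simp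
      rw [hg]
      have hne : y ≠ rest.getD k 0 := by
        intro hcon
        apply hy
        rw [hcon]
        rw [List.getD_eq_getElem?_getD, List.getElem?_eq_getElem hk']
        exact List.getElem_mem hk'
      rw [List.erase_cons_tail (by simpa using hne), List.eraseIdx_cons_succ, ih hrest k hk']

lemma pvFilter_set_true (n : Nat) (used : List Bool) (hn : used.length = n)
    (us : List Nat) (hus : us = (List.range n).filter (fun j => !(used.getD j false)))
    (k : Nat) (hk : k < us.length) :
    (List.range n).filter (fun j => !((used.set (us.getD k 0) true).getD j false)) =
      us.eraseIdx k := by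
  set i := us.getD k 0 with hi
  have himem : i ∈ us := by
    rw [hi, List.getD_eq_getElem?_getD, List.getElem?_eq_getElem hk]
    exact List.getElem_mem hk
  have hiprop := List.mem_filter.mp (hus ▸ himem)
  have hilt : i < n := List.mem_range.mp hiprop.1
  have husnd : us.Nodup := hus ▸ (List.nodup_range).filter _
  have hstep : (List.range n).filter (fun j => !((used.set i true).getD j false)) =
      (List.range n).filter (fun j => (j != i) && !(used.getD j false)) := by
    apply List.filter_congr
    intro j hj
    have hjlt : j < n := List.mem_range.mp hj
    by_cases hij : i = j
    · subst hij
      simp [List.getD_eq_getElem?_getD, List.getElem?_set, hn ▸ hilt]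
    · simp [List.getD_eq_getElem?_getD, List.getElem?_set, hij, Ne.symm hij]
  rw [hstep]
  rw [← List.filter_filter, ← hus, ← List.Nodup.erase_eq_filter husnd, hi,
    pvErase_getD_eq_eraseIdx us husnd k hk]

def pvCostB (cs : List (List Int)) (cur : PySem.Set Int) (i : Nat) : Int :=
  (cur.length : Int) + (((cs.map PySem.Set.ofList).getD i []).length : Int)
    - 2 * (pvBInter (cs.map PySem.Set.ofList).length (pvBInv (cs.map PySem.Set.ofList)) cur).getD i 0

lemma pvBScan_eq_pick (n : Nat) (used : List Bool) (sets : List (List Int))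
    (cur : PySem.Set Int) (inter : List Int) :
    pvBScan n used sets cur inter =
      pvPick (((List.range n).filter (fun i => !(used.getD i false))).map
        (fun i => (i, (cur.length : Int) + ((sets.getD i []).length : Int) - 2 * inter.getD i 0)))
        (none, 1000000000) := by
  unfold pvBScan
  exact pvFoldl_scan_eq_pick (fun i => used.getD i false)
    (fun i => (cur.length : Int) + ((sets.getD i []).length : Int) - 2 * inter.getD i 0)
    (List.range n) (none, 1000000000)

lemma pvBScan_eq_pickB (cs : List (List Int)) (used : List Bool) (cur : PySem.Set Int) :
    pvBScan (cs.map PySem.Set.ofList).length used (cs.map PySem.Set.ofList) cur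
        (pvBInter (cs.map PySem.Set.ofList).length (pvBInv (cs.map PySem.Set.ofList)) cur) =
      pvPick (((List.range (cs.map PySem.Set.ofList).length).filter
          (fun i => !(used.getD i false))).map (fun i => (i, pvCostB cs cur i)))
        (none, 1000000000) :=
  pvBScan_eq_pick (cs.map PySem.Set.ofList).length used (cs.map PySem.Set.ofList) cur
    (pvBInter (cs.map PySem.Set.ofList).length (pvBInv (cs.map PySem.Set.ofList)) cur)

-- the two loops agree step for step.
lemma pvLoop_eq (cs : List (List Int)) :
    ∀ (f : Nat) (used : List Bool) (cur : PySem.Set Int) (out : List (List Int)),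
      used.length = cs.length → cur.Nodup →
      ((List.range cs.length).filter (fun j => !(used.getD j false))).length = f →
      pvALoop f
          (((List.range cs.length).filter (fun j => !(used.getD j false))).map (fun i => cs.getD i []))
          cur out =
        pvBLoop cs (cs.map PySem.Set.ofList) (pvBInv (cs.map PySem.Set.ofList)) f used out cur := by
  intro f
  induction f with
  | zero => intro used cur out _ _ _; rfl
  | succ f ih =>
    intro used cur out hlen hnd hf
    have hsetslen : (cs.map PySem.Set.ofList).length = cs.length := List.length_map ..
    have hsnodup : ∀ s ∈ cs.map PySem.Set.ofList, s.Nodup := by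
      intro s hsmem
      rcases List.mem_map.mp hsmem with ⟨t, _, rfl⟩
      exact PySem.Set.nodup_ofList t
    have hsets_getD : ∀ i, i < cs.length →
        (cs.map PySem.Set.ofList).getD i [] = PySem.Set.ofList (cs.getD i []) := by
      intro i hi
      exact pvGetD_map_lt PySem.Set.ofList cs i [] [] hi
    set us := (List.range cs.length).filter (fun j => !(used.getD j false)) with hus
    have husne : us ≠ [] := by
      intro hcon
      rw [hcon] at hf
      simp at hf
    -- the two cost sequences agree
    have hcosts : (us.map (fun i => cs.getD i [])).map
        (fun s => ((PySem.Set.symmDiff cur (PySem.Set.ofList s)).length : Int)) =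
        us.map (pvCostB cs cur) := by
      rw [List.map_map]
      apply List.map_congr_left
      intro i hi
      have hiprop := List.mem_filter.mp (hus ▸ hi)
      have hilt : i < cs.length := List.mem_range.mp hiprop.1
      have hinter := pvBInter_getD (cs.map PySem.Set.ofList) hsnodup i (hsetslen ▸ hilt) cur
      simp only [Function.comp_apply, pvCostB]
      rw [pvCost_eq (cur := cur) (s := cs.getD i []) hnd, hinter, hsets_getD i hilt]
    -- one step of A
    rw [show pvALoop (f + 1) (us.map (fun i => cs.getD i [])) cur out =
        (if (us.map (fun i => cs.getD i [])).isEmpty then out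
         else
          match (pvAScan cur (us.map (fun i => cs.getD i [])) 0 (none, 1000000000)).1 with
          | none => out
          | some bi =>
            pvALoop f ((us.map (fun i => cs.getD i [])).eraseIdx bi)
              (PySem.Set.ofList ((us.map (fun i => cs.getD i [])).getD bi []))
              (out ++ [(us.map (fun i => cs.getD i [])).getD bi []])) from rfl]
    rw [if_neg (by simp [List.isEmpty_iff, husne])]
    rw [pvAScan_eq_pick, hcosts]
    -- one step of B
    rw [show pvBLoop cs (cs.map PySem.Set.ofList) (pvBInv (cs.map PySem.Set.ofList)) (f + 1) used out cur =
        (match (pvBScan (cs.map PySem.Set.ofList).length used (cs.map PySem.Set.ofList) cur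
            (pvBInter (cs.map PySem.Set.ofList).length (pvBInv (cs.map PySem.Set.ofList)) cur)).1 with
         | none => out
         | some i =>
           pvBLoop cs (cs.map PySem.Set.ofList) (pvBInv (cs.map PySem.Set.ofList)) f (used.set i true)
             (out ++ [cs.getD i []]) ((cs.map PySem.Set.ofList).getD i [])) from rfl]
    rw [pvBScan_eq_pickB, hsetslen, ← hus]
    -- relate the two selections
    have hrel : (pvEnum 0 (us.map (pvCostB cs cur))).map (fun q => (us.getD q.1 0, q.2)) =
        us.map (fun i => (i, pvCostB cs cur i)) :=
      pvEnum_relabel (fun t => us.getD t 0) (pvCostB cs cur) us 0 (by intro j hj; simp)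
    have hpick := pvPick_map (fun t => us.getD t 0) (pvEnum 0 (us.map (pvCostB cs cur))) none 1000000000
    simp only [Option.map_none] at hpick
    rw [hrel] at hpick
    rw [hpick]
    cases hA : (pvPick (pvEnum 0 (us.map (pvCostB cs cur))) (none, 1000000000)).1 with
    | none => rfl
    | some k =>
      have hklt : k < us.length := by
        rcases pvPick_fst_some _ _ _ hA with hcon | hmem
        · exact absurd hcon (by simp)
        · have := pvEnum_fst_lt _ 0 k hmem
          simpa using this
      simp only [Option.map_some]
      set i := us.getD k 0 with hidef
      have himem : i ∈ us := by
        rw [hidef, List.getD_eq_getElem?_getD, List.getElem?_eq_getElem hklt]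
        exact List.getElem_mem hklt
      have hiprop := List.mem_filter.mp (hus ▸ himem)
      have hilt : i < cs.length := List.mem_range.mp hiprop.1
      have hnxt : (us.map (fun i => cs.getD i [])).getD k [] = cs.getD i [] := by
        rw [pvGetD_map_lt (fun i => cs.getD i []) us k 0 [] hklt]
      rw [hnxt]
      rw [List.eraseIdx_map]
      have hfilter := pvFilter_set_true cs.length used hlen us hus k hklt
      have hlen' : (used.set i true).length = cs.length := by simp [hlen]
      have hf' : ((List.range cs.length).filter
          (fun j => !((used.set i true).getD j false))).length = f := by
        rw [← hidef] at hfilter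
        rw [hfilter, List.length_eraseIdx_of_lt hklt]
        omega
      have := ih (used.set i true) (PySem.Set.ofList (cs.getD i []))
        (out ++ [cs.getD i []]) hlen' (PySem.Set.nodup_ofList _) hf'
      rw [← hidef] at hfilter
      rw [hfilter] at this
      rw [this, hsets_getD i hilt]

-- ===== VERDICT (by name: the statement is the Claim_ definition above) =====
theorem greedy_order_by_symdiff_spec : Claim_equal_greedy_order_by_symdiff := by
  unfold Claim_equal_greedy_order_by_symdiff
  intro cs _
  unfold Spec_greedy_order_by_symdiff greedy_order_by_symdiff greedy_order_by_symdiff_alt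
  have hfilter : (List.range cs.length).filter
      (fun j => !((List.replicate cs.length false).getD j false)) = List.range cs.length := by
    apply List.filter_eq_self.mpr
    intro j hj
    have hjlt : j < cs.length := List.mem_range.mp hj
    rw [List.getD_replicate _ hjlt]
    rfl
  have h := pvLoop_eq cs cs.length (List.replicate cs.length false) PySem.Set.empty []
    (by simp) List.Pairwise.nil (by rw [hfilter]; exact List.length_range ..)
  rw [hfilter, pvRange_map_getD] at h
  exact h
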